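-- pv_equiv track=rewrite | github.com/s2000n/AES-encryption-python | aes.py | add_round
-- ===== SOURCE A (Python) =====
-- def hx1(v1):
--     hex_v1 = {'0': '0000', '1': '0001', '2': '0010', '3': '0011',
--                '4': '0100', '5': '0101', '6': '0110', '7': '0111',
--                '8': '1000', '9': '1001', 'a': '1010', 'b': '1011',
--                'c': '1100', 'd': '1101', 'e': '1110', 'f': '1111'}
--     msg_len = len(v1)
--     final = ''
--     for i in range(0, msg_len):
--         final = final + hex_v1[v1[i]]
--     return final
--
-- def hx2(v1):
--     bin_v1 = {'0000': '0', '0001': '1', '0010': '2', '0011': '3',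
--                '0100': '4', '0101': '5', '0110': '6', '0111': '7',
--                '1000': '8', '1001': '9', '1010': 'a', '1011': 'b',
--                '1100': 'c', '1101': 'd', '1110': 'e', '1111': 'f'}
--     msg_len = len(v1)
--     lst = []
--     final = ''
--     count = 0
--     i = 0
--     while count != msg_len:
--         lst = lst + [v1[count:count + 4]]
--         final = final + bin_v1[lst[i]]
--         i = i + 1
--         count = count + 4
--
--     return final
--
-- def xor(left, right):
--     final = ''
--     l_len = len(left)
--     for i in range(0, l_len):
--         if left[i] == right[i]:
--             final = final + '0'
--         elif left[i] != right[i]: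
--             final = final + '1'
--     return final
--
-- def col_to_row(v1):
--     row = []
--     for i in range(0, 4):
--         col = []
--         for j in range(0, 4):
--             col = col + [v1[j][i]]
--         row = row + [col]
--
--     return row
--
-- def add_round(plain_text, keys):
--     row = []
--     for i in range(0, 4):
--         col = []
--         for j in range(0, 4):
--             tmp = xor(hx1(keys[i][j]), hx1(plain_text[i][j]))
--             col = col + [hx2(tmp)]
--         row = row + [col]
--
--     return col_to_row(row)
-- ===== SOURCE B (Python) =====
-- def add_round(plain_text, keys):
--     digits = '0123456789abcdef'
--     val = {c: v for v, c in enumerate(digits)}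
--     out = []
--     for i in range(4):
--         row = []
--         for j in range(4):
--             kc = keys[j][i]
--             pc = plain_text[j][i]
--             row.append(''.join(digits[val[kc[p]] ^ val[pc[p]]]
--                                for p in range(len(kc))))
--         out.append(row)
--     return out
-- ===== Notes on version B (the rewrite author's own statement) =====
-- stated objective: simpler
-- what changed: Replaces the hex->binary-string/bitwise-char-xor/binary->hex pipeline plus separate transpose pass by a single direct construction: a nibble-value table and integer XOR per character, writing the transposed result in place.
import Mathlib
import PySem

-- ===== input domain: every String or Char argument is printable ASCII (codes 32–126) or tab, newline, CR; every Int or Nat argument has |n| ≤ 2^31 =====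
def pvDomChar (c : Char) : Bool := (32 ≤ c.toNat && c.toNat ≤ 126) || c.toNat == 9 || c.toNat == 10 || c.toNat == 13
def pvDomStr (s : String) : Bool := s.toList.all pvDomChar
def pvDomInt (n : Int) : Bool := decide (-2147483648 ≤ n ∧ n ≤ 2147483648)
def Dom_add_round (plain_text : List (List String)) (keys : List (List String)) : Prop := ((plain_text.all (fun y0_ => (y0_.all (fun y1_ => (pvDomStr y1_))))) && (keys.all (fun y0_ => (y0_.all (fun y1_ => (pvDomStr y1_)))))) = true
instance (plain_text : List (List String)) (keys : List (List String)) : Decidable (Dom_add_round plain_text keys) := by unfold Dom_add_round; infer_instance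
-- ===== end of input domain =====

-- B replaces A's hex→binary-string / char-wise xor / binary→hex pipeline and separate
-- transpose pass by one direct construction: a nibble table, integer XOR per character,
-- writing the transposed cell in place (simpler; same asymptotic cost).

-- ===== PORT A =====
-- hx1's dict: a hex char to its 4 binary chars (missing key = KeyError, excluded by Pre_)
def hexBitsA (c : Char) : List Char :=
  match c with
  | '0' => ['0','0','0','0'] | '1' => ['0','0','0','1'] | '2' => ['0','0','1','0'] | '3' => ['0','0','1','1']
  | '4' => ['0','1','0','0'] | '5' => ['0','1','0','1'] | '6' => ['0','1','1','0'] | '7' => ['0','1','1','1']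
  | '8' => ['1','0','0','0'] | '9' => ['1','0','0','1'] | 'a' => ['1','0','1','0'] | 'b' => ['1','0','1','1']
  | 'c' => ['1','1','0','0'] | 'd' => ['1','1','0','1'] | 'e' => ['1','1','1','0'] | 'f' => ['1','1','1','1']
  | _ => []

def hx1A (v1 : List Char) : List Char :=
  v1.foldl (fun acc c => acc ++ hexBitsA c) []

-- hx2's dict: 4 binary chars back to a hex char (missing key = KeyError, excluded by Pre_)
def binHexA (w : List Char) : Char :=
  match w with
  | ['0','0','0','0'] => '0' | ['0','0','0','1'] => '1' | ['0','0','1','0'] => '2' | ['0','0','1','1'] => '3'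
  | ['0','1','0','0'] => '4' | ['0','1','0','1'] => '5' | ['0','1','1','0'] => '6' | ['0','1','1','1'] => '7'
  | ['1','0','0','0'] => '8' | ['1','0','0','1'] => '9' | ['1','0','1','0'] => 'a' | ['1','0','1','1'] => 'b'
  | ['1','1','0','0'] => 'c' | ['1','1','0','1'] => 'd' | ['1','1','1','0'] => 'e' | ['1','1','1','1'] => 'f'
  | _ => '?'

-- hx2's while loop, 4 chars per step; on reachable inputs (length a multiple of 4,
-- since the input is xor's output over hx1 output) this is exactly Python's loop
def hx2A : List Char → List Char
  | [] => []
  | c :: rest => binHexA (List.take 4 (c :: rest)) :: hx2A (List.drop 3 rest)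
termination_by l => l.length
decreasing_by simp

-- xor iterates over left's indices reading right[i]; right shorter = IndexError, excluded by Pre_
def xorA : List Char → List Char → List Char
  | [], _ => []
  | _ :: _, [] => []
  | a :: as, b :: bs => (if a == b then '0' else '1') :: xorA as bs

def cellA (k p : String) : String :=
  String.mk (hx2A (xorA (hx1A k.toList) (hx1A p.toList)))

-- out-of-range list indexing (IndexError) is excluded by Pre_; getD stands for v[i]
def col_to_rowA (v1 : List (List String)) : List (List String) :=
  (List.range 4).map (fun i => (List.range 4).map (fun j => (v1.getD j []).getD i ""))

def add_round (plain_text : List (List String)) (keys : List (List String)) : List (List String) :=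
  col_to_rowA ((List.range 4).map (fun i => (List.range 4).map (fun j =>
    cellA ((keys.getD i []).getD j "") ((plain_text.getD i []).getD j ""))))

-- ===== PORT B =====
-- Source B's val dict (KeyError on a non-hex char is excluded by Pre_)
def nibbleB (c : Char) : Nat :=
  match c with
  | '0' => 0 | '1' => 1 | '2' => 2 | '3' => 3 | '4' => 4 | '5' => 5 | '6' => 6 | '7' => 7
  | '8' => 8 | '9' => 9 | 'a' => 10 | 'b' => 11 | 'c' => 12 | 'd' => 13 | 'e' => 14 | 'f' => 15
  | _ => 0

-- digits[n] (n is always 0..15 here, so plain indexing is exact)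
def hexDigitB (n : Nat) : Char :=
  ['0','1','2','3','4','5','6','7','8','9','a','b','c','d','e','f'].getD n '?'

def cellB (kc pc : List Char) : String :=
  String.mk ((List.range kc.length).map (fun p =>
    hexDigitB (Nat.xor (nibbleB (kc.getD p ' ')) (nibbleB (pc.getD p ' ')))))

def add_round_alt (plain_text : List (List String)) (keys : List (List String)) : List (List String) :=
  (List.range 4).map (fun i => (List.range 4).map (fun j =>
    cellB ((keys.getD j []).getD i "").toList ((plain_text.getD j []).getD i "").toList))

def hexChars : List Char :=
  ['0','1','2','3','4','5','6','7','8','9','a','b','c','d','e','f']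

-- ===== PRECONDITION & SPEC =====
-- Pre_ = exactly where Python A returns: both grids have at least 4 rows of at least 4
-- cells, the 16 used cells of each grid are lowercase-hex strings (else KeyError), and
-- no key cell is longer than its plaintext cell (else IndexError in xor).
def Pre_add_round (plain_text : List (List String)) (keys : List (List String)) : Prop :=
  4 ≤ plain_text.length ∧ 4 ≤ keys.length ∧
  ∀ i ∈ List.range 4,
    4 ≤ (plain_text.getD i []).length ∧ 4 ≤ (keys.getD i []).length ∧
    ∀ j ∈ List.range 4,
      (((plain_text.getD i []).getD j "").toList.all (hexChars.contains ·)) = true ∧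
      (((keys.getD i []).getD j "").toList.all (hexChars.contains ·)) = true ∧
      ((keys.getD i []).getD j "").toList.length ≤ ((plain_text.getD i []).getD j "").toList.length

instance (plain_text : List (List String)) (keys : List (List String)) : Decidable (Pre_add_round plain_text keys) := by
  unfold Pre_add_round; infer_instance

def pvWitness_add_round : List (List String) × List (List String) :=
  ([["00","1a","2b","3c"],["4d","5e","6f","70"],["81","92","a3","b4"],["c5","d6","e7","f8"]],
   [["ff","01","23","45"],["67","89","ab","cd"],["ef","10","32","54"],["76","98","ba","dc"]])

def Spec_add_round (plain_text : List (List String)) (keys : List (List String)) (out : List (List String)) : Prop := out = add_round_alt plain_text keys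
instance (plain_text : List (List String)) (keys : List (List String)) (out : List (List String)) : Decidable (Spec_add_round plain_text keys out) := by unfold Spec_add_round; infer_instance

-- ===== CLAIM (what is proved, stated in full; the proofs are below) =====
def Claim_equal_add_round : Prop := ∀ (plain_text : List (List String)) (keys : List (List String)), Dom_add_round plain_text keys → Pre_add_round plain_text keys → Spec_add_round plain_text keys (add_round plain_text keys)

-- ===== LEMMAS AND PROOFS =====

theorem foldl_append_hexBits (l : List Char) (acc : List Char) :
    l.foldl (fun a c => a ++ hexBitsA c) acc = acc ++ l.flatMap hexBitsA := by
  induction l generalizing acc with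
  | nil => simp
  | cons c cs ih => simp [List.foldl, ih, List.append_assoc]

theorem hx1A_eq (l : List Char) : hx1A l = l.flatMap hexBitsA := by
  unfold hx1A; rw [foldl_append_hexBits]; simp

theorem xorA_append (x u y v : List Char) (h : x.length = y.length) :
    xorA (x ++ u) (y ++ v) = xorA x y ++ xorA u v := by
  induction x generalizing y with
  | nil => cases y with
    | nil => simp [xorA]
    | cons b bs => simp at h
  | cons a as ih =>
    cases y with
    | nil => simp at h
    | cons b bs =>
      simp only [List.cons_append, xorA, List.length_cons] at h ⊢
      rw [ih bs (by omega)]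

theorem hx2A_four (w rest : List Char) (h : w.length = 4) :
    hx2A (w ++ rest) = binHexA w :: hx2A rest := by
  match w with
  | [] => simp at h
  | [_] => simp at h
  | [_,_] => simp at h
  | [_,_,_] => simp at h
  | a :: b :: c :: d :: w' =>
    have hw' : w' = [] := by simp at h; simpa using h
    subst hw'
    rw [List.cons_append, hx2A]
    simp

theorem char_case :
    ∀ a ∈ hexChars, ∀ b ∈ hexChars,
      binHexA (xorA (hexBitsA a) (hexBitsA b)) = hexDigitB (Nat.xor (nibbleB a) (nibbleB b)) := by
  intro a ha b hb
  fin_cases ha <;> fin_cases hb <;> decide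

theorem xorA_hex_len :
    ∀ a ∈ hexChars, ∀ b ∈ hexChars,
      (xorA (hexBitsA a) (hexBitsA b)).length = 4 := by
  intro a ha b hb
  fin_cases ha <;> fin_cases hb <;> decide

theorem hexBits_len : ∀ a ∈ hexChars, (hexBitsA a).length = 4 := by
  intro a ha
  fin_cases ha <;> decide

theorem cell_eq : ∀ (kc pc : List Char),
    (∀ c ∈ kc, c ∈ hexChars) →
    (∀ c ∈ pc, c ∈ hexChars) →
    kc.length ≤ pc.length →
    hx2A (xorA (hx1A kc) (hx1A pc)) =
      (List.range kc.length).map (fun p =>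
        hexDigitB (Nat.xor (nibbleB (kc.getD p ' ')) (nibbleB (pc.getD p ' ')))) := by
  intro kc
  induction kc with
  | nil => intro pc _ _ _; simp [hx1A, xorA]; rw [hx2A]
  | cons a as ih =>
    intro pc hk hp hlen
    cases pc with
    | nil => simp at hlen
    | cons b bs =>
      have ha : a ∈ hexChars := hk a (by simp)
      have hb : b ∈ hexChars := hp b (by simp)
      rw [hx1A_eq, hx1A_eq, List.flatMap_cons, List.flatMap_cons,
          xorA_append _ _ _ _ (by rw [hexBits_len a ha, hexBits_len b hb]),
          hx2A_four _ _ (xorA_hex_len a ha b hb),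
          char_case a ha b hb]
      have htail := ih bs (fun c hc => hk c (by simp [hc])) (fun c hc => hp c (by simp [hc]))
        (by simpa using hlen)
      rw [← hx1A_eq, ← hx1A_eq, htail]
      simp [List.range_succ_eq_map, List.map_map, Function.comp]

theorem cellAB (k p : String)
    (hk : ∀ c ∈ k.toList, c ∈ hexChars)
    (hp : ∀ c ∈ p.toList, c ∈ hexChars)
    (hlen : k.toList.length ≤ p.toList.length) :
    cellA k p = cellB k.toList p.toList := by
  unfold cellA cellB
  rw [cell_eq k.toList p.toList hk hp hlen]

-- ===== VERDICT (by name: the statement is the Claim_ definition above) =====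
theorem add_round_spec : Claim_equal_add_round := by
  intro p k _ hpre
  obtain ⟨_, _, hcell⟩ := hpre
  have w : ∀ i j, i ∈ List.range 4 → j ∈ List.range 4 →
      cellA ((k.getD i []).getD j "") ((p.getD i []).getD j "")
        = cellB ((k.getD i []).getD j "").toList ((p.getD i []).getD j "").toList :=
    fun i j hi hj => by
      obtain ⟨hp1, hk1, hl1⟩ := (hcell i hi).2.2 j hj
      simp only [List.all_eq_true, List.contains_iff_mem] at hp1 hk1
      exact cellAB _ _ (fun c hc => hk1 c hc) (fun c hc => hp1 c hc) hl1
  show add_round p k = add_round_alt p k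
  have hr : List.range 4 = [0,1,2,3] := rfl
  simp only [add_round, add_round_alt, col_to_rowA, hr, List.map_cons, List.map_nil,
    List.getD_cons_zero, List.getD_cons_succ]
  rw [w 0 0 (by decide) (by decide), w 0 1 (by decide) (by decide), w 0 2 (by decide) (by decide),
      w 0 3 (by decide) (by decide), w 1 0 (by decide) (by decide), w 1 1 (by decide) (by decide),
      w 1 2 (by decide) (by decide), w 1 3 (by decide) (by decide), w 2 0 (by decide) (by decide),
      w 2 1 (by decide) (by decide), w 2 2 (by decide) (by decide), w 2 3 (by decide) (by decide),
      w 3 0 (by decide) (by decide), w 3 1 (by decide) (by decide), w 3 2 (by decide) (by decide),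
      w 3 3 (by decide) (by decide)]
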